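-- pv_equiv track=rewrite | github.com/keoghrmj/Pre-course | L1 Challenge 4 Task 1, part 2.py | boredom
-- ===== SOURCE A (Python) =====
-- def boredom(staff):
--     total_score = 0
--     for departments in staff.values():
--         for department, score in department_score.items():
--             if departments == department:
--                 total_score += score
--     if total_score <= 80:
--         return "kill me now"
--     elif total_score < 100 and total_score > 80:
--         return 'i can handle this'
--     else:
--         return 'party time'
--
-- staff = {"tim": "IS", "jim": "finance",
--          "randy": "pissing about", "sandy": "cleaning", "andy": "cleaning",
--          "katie": "cleaning", "laura": "pissing about", "saajid": "regulation",
--          "alex": "regulation", "john": "accounts", "mr": "canteen"}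
--
-- department_score = {"accounts": 1, "finance": 2, "canteen": 10,
--                     "regulation": 3, "trading": 6, "change": 6, "IS": 8,
--                     "retail": 5, "cleaning": 4, "pissing about": 25}
-- ===== SOURCE B (Python) =====
-- def boredom(staff):
--     counts = {}
--     for dept in staff.values():
--         counts[dept] = counts.get(dept, 0) + 1
--     total_score = 0
--     for dept, count in counts.items():
--         total_score += department_score.get(dept, 0) * count
--     if total_score <= 80:
--         return "kill me now"
--     elif total_score < 100:
--         return 'i can handle this'
--     else:
--         return 'party time'
--
-- department_score = {"accounts": 1, "finance": 2, "canteen": 10,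
--                     "regulation": 3, "trading": 6, "change": 6, "IS": 8,
--                     "retail": 5, "cleaning": 4, "pissing about": 25}
-- ===== Notes on version B (the rewrite author's own statement) =====
-- stated objective: alternative
-- what changed: B builds a frequency map of departments in one pass over staff and then sums score*count over the distinct departments via department_score.get(dept, 0), replacing A's per-employee inner scan of department_score; the bucketing chain is kept.
import Mathlib
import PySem

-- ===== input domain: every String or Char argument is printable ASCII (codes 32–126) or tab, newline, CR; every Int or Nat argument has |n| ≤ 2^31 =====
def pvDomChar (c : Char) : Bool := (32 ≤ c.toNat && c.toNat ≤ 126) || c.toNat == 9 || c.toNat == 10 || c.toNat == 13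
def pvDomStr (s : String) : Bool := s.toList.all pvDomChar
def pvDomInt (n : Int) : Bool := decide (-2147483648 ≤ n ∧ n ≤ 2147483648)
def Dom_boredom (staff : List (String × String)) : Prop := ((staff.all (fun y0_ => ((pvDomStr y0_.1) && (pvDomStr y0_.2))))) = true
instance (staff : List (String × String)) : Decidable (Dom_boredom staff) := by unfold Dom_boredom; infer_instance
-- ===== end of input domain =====

-- B replaces A's per-employee inner scan of department_score with a one-pass frequency map of
-- departments followed by a score*count sum over the distinct departments (alternative decomposition).

-- module constant department_score (items in Python insertion order), shared context of A and B
def pvScoreItems : List (String × Int) :=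
  [("accounts", 1), ("finance", 2), ("canteen", 10), ("regulation", 3), ("trading", 6),
   ("change", 6), ("IS", 8), ("retail", 5), ("cleaning", 4), ("pissing about", 25)]

-- ===== PORT A =====
def boredom (staff : List (String × String)) : String :=
  let vals := (PySem.Dict.ofList staff).values
  let total_score : Int :=
    vals.foldl (fun t departments =>
      pvScoreItems.foldl (fun t2 p => if departments == p.1 then t2 + p.2 else t2) t) 0
  if total_score ≤ 80 then "kill me now"
  else if total_score < 100 ∧ total_score > 80 then "i can handle this"
  else "party time"

-- ===== PORT B =====
def boredom_alt (staff : List (String × String)) : String :=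
  let vals := (PySem.Dict.ofList staff).values
  let counts := vals.foldl (fun d x => d.insert x (d.getD x 0 + 1)) PySem.Dict.empty
  let total_score : Int :=
    counts.items.foldl (fun t p => t + (PySem.Dict.ofList pvScoreItems).getD p.1 0 * p.2) 0
  if total_score ≤ 80 then "kill me now"
  else if total_score < 100 then "i can handle this"
  else "party time"

-- ===== PRECONDITION & SPEC =====
def Spec_boredom (staff : List (String × String)) (out : String) : Prop := out = boredom_alt staff
instance (staff : List (String × String)) (out : String) : Decidable (Spec_boredom staff out) := by unfold Spec_boredom; infer_instance

-- ===== CLAIM (what is proved, stated in full; the proofs are below) =====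
def Claim_equal_boredom : Prop := ∀ (staff : List (String × String)), Dom_boredom staff → Spec_boredom staff (boredom staff)

-- ===== LEMMAS AND PROOFS =====

-- a scan matching d against keys none of which is d leaves the accumulator unchanged
theorem pv_notin (d : String) (l : List (String × Int)) (h : ∀ p ∈ l, d ≠ p.1) (t : Int) :
    l.foldl (fun t2 p => if d == p.1 then t2 + p.2 else t2) t = t := by
  induction l generalizing t with
  | nil => rfl
  | cons p rest ih =>
    simp only [List.foldl_cons]
    rw [if_neg (by simp [h p (by simp)]), ih (fun q hq => h q (by simp [hq]))]

-- A's inner scan of an assoc list with distinct keys adds exactly the dict lookup (0 if absent)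
theorem pv_inner_scan (d : String) (l : List (String × Int)) (hnd : (l.map Prod.fst).Nodup) (t : Int) :
    l.foldl (fun t2 p => if d == p.1 then t2 + p.2 else t2) t
      = t + (PySem.Dict.mk l).getD d 0 := by
  induction l generalizing t with
  | nil => simp [PySem.Dict.getD, PySem.Dict.get?]
  | cons p rest ih =>
    obtain ⟨k, v⟩ := p
    simp only [List.map_cons, List.nodup_cons] at hnd
    simp only [List.foldl_cons]
    rw [PySem.Dict.getD_eq_get?_getD, PySem.Dict.get?_mk_cons]
    by_cases hdk : d = k
    · subst hdk
      rw [if_pos (by simp), if_pos (by simp)]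
      rw [pv_notin d rest (by intro q hq he; exact hnd.1 (he ▸ List.mem_map_of_mem hq)) (t + v)]
      simp
    · rw [if_neg (by simp [hdk]), if_neg (by simp [Ne.symm hdk])]
      rw [ih hnd.2 t, PySem.Dict.getD_eq_get?_getD]

-- a sum over a list equals the multiplicity-weighted sum over its distinct elements
theorem pv_group_sum (f : String → Int) (l : List String) :
    (l.map f).sum = ((PySem.Set.ofList l).map (fun k => f k * (l.count k : Int))).sum := by
  have hnd : (PySem.Set.ofList l).Nodup := PySem.Set.nodup_ofList l
  have hfin : (PySem.Set.ofList l).toFinset = l.toFinset := by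
    ext x; simp [List.mem_toFinset, PySem.Set.mem_ofList]
  rw [Finset.sum_list_map_count l f, ← hfin, List.sum_toFinset _ hnd]
  simp [mul_comm]

-- the two totals agree on any list of department values
theorem pv_totals (vals : List String) :
    vals.foldl (fun t departments =>
      pvScoreItems.foldl (fun t2 p => if departments == p.1 then t2 + p.2 else t2) t) 0
    = (vals.foldl (fun d x => d.insert x (d.getD x 0 + 1)) PySem.Dict.empty).items.foldl
        (fun t p => t + (PySem.Dict.ofList pvScoreItems).getD p.1 0 * p.2) 0 := by
  have hdict : PySem.Dict.ofList pvScoreItems = PySem.Dict.mk pvScoreItems := rfl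
  have hnd : (pvScoreItems.map Prod.fst).Nodup := by decide
  have hA : vals.foldl (fun t departments =>
      pvScoreItems.foldl (fun t2 p => if departments == p.1 then t2 + p.2 else t2) t) 0
      = vals.foldl (fun t d => t + (PySem.Dict.mk pvScoreItems).getD d 0) 0 :=
    PySem.List.foldl_congr_mem _ _ _ _ (fun acc x _ => pv_inner_scan x pvScoreItems hnd acc)
  rw [hA, PySem.List.foldl_add]
  rw [PySem.Dict.foldl_insert_getD_add_one_eq_counter, PySem.Dict.items_counter,
      PySem.List.foldl_add, hdict]
  rw [List.map_map, pv_group_sum]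
  rfl

-- ===== VERDICT (by name: the statement is the Claim_ definition above) =====
theorem boredom_spec : Claim_equal_boredom := by
  intro staff _
  unfold Spec_boredom
  simp only [boredom, boredom_alt]
  rw [pv_totals]
  split_ifs with h1 h2 h3 <;> first | rfl | omega
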